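-- pv_equiv track=rewrite | github.com/mdmarti/autoencoded-vocal-analysis | ava/segmenting/utils.py | _is_valid_response
-- ===== SOURCE A (Python) =====
-- def _is_valid_response(response, num_specs):
-- 	if response == '':
-- 		return True
-- 	try:
-- 		responses = [int(i) for i in response.split(' ')]
-- 		return min(responses) >= 0 and max(responses) < num_specs
-- 	except:
-- 		return False
-- ===== SOURCE B (Python) =====
-- def _is_valid_response(response, num_specs):
-- 	if response == '':
-- 		return True
-- 	try:
-- 		ordered = sorted(int(tok) for tok in response.split(' '))
-- 		return 0 <= ordered[0] and ordered[-1] < num_specs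
-- 	except:
-- 		return False
-- ===== Notes on version B (the rewrite author's own statement) =====
-- stated objective: alternative
-- what changed: B sorts the parsed integers and range-checks only the two endpoints ordered[0] and ordered[-1], instead of A's list-build followed by min() and max() aggregate passes; the empty-string guard, split(' ') and the bare except are kept.
import Mathlib
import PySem

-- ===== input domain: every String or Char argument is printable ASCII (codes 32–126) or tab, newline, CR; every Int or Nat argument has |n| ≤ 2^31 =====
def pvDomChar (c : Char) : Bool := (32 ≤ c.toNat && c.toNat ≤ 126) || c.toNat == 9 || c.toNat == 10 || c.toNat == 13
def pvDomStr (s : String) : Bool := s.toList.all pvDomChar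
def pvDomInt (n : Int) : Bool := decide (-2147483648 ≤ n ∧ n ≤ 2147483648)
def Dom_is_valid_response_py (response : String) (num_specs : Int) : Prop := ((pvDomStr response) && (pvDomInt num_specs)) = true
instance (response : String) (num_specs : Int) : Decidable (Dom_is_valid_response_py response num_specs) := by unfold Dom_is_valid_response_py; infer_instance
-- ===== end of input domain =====

-- B sorts the parsed integers and range-checks only the endpoints ordered[0] and
-- ordered[-1], instead of A's list-build followed by min()/max() aggregates;
-- return value proved equal on all inputs.

-- ===== PORT A =====
def is_valid_response_py (response : String) (num_specs : Int) : Bool :=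
  if response == "" then true
  else
    match PySem.Str.split? response " " with
    | none => false  -- unreachable: the separator " " is nonempty
    | some toks =>
      -- responses = [int(i) for i in response.split(' ')]; any int() failure → except → False
      match toks.mapM PySem.Int.ofStr? with
      | none => false
      | some responses =>
        -- min(responses) >= 0 and max(responses) < num_specs; min/max of [] raise → False
        match PySem.List.min? responses (fun v => v), PySem.List.max? responses (fun v => v) with
        | some mn, some mx => decide (0 ≤ mn) && decide (mx < num_specs)
        | _, _ => false

-- ===== PORT B =====
def is_valid_response_py_alt (response : String) (num_specs : Int) : Bool :=
  if response == "" then true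
  else
    -- the try block as an Option pipeline: any raising step (int(), [0], [-1]) yields
    -- none, and the trailing `.getD false` is the bare except returning False
    (PySem.Str.split? response " " |>.bind (fun toks =>
      toks.mapM PySem.Int.ofStr? |>.bind (fun vals =>
        let ordered := PySem.List.sorted vals (fun v => v) false
        PySem.List.pyGet? ordered 0 |>.bind (fun first =>
          PySem.List.pyGet? ordered (-1) |>.map (fun last =>
            decide (0 ≤ first) && decide (last < num_specs)))))).getD false

-- ===== PRECONDITION & SPEC =====
def Spec_is_valid_response_py (response : String) (num_specs : Int) (out : Bool) : Prop := out = is_valid_response_py_alt response num_specs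
instance (response : String) (num_specs : Int) (out : Bool) : Decidable (Spec_is_valid_response_py response num_specs out) := by unfold Spec_is_valid_response_py; infer_instance

-- ===== CLAIM (what is proved, stated in full; the proofs are below) =====
def Claim_equal_is_valid_response_py : Prop := ∀ (response : String) (num_specs : Int), Dom_is_valid_response_py response num_specs → Spec_is_valid_response_py response num_specs (is_valid_response_py response num_specs)

-- ===== LEMMAS AND PROOFS =====

-- splitOn.go always returns a nonempty list (every base case reverses a cons onto acc)
lemma splitOn_go_ne_nil (sep : List Char) :
    ∀ (fuel : Nat) (l cur : List Char) (acc : List (List Char)),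
      PySem.Chars.splitOn.go sep fuel l cur acc ≠ [] := by
  intro fuel
  induction fuel with
  | zero => intro l cur acc; simp [PySem.Chars.splitOn.go]
  | succ n ih =>
    intro l cur acc
    cases l with
    | nil => simp [PySem.Chars.splitOn.go]
    | cons c rest =>
      rw [PySem.Chars.splitOn.go]
      split_ifs with h
      · exact ih _ _ _
      · exact ih _ _ _

lemma splitOn_ne_nil (s sep : List Char) : PySem.Chars.splitOn s sep ≠ [] := by
  unfold PySem.Chars.splitOn
  exact splitOn_go_ne_nil sep _ s [] []

lemma split?_some_ne_nil (s sep : String) (toks : List String)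
    (h : PySem.Str.split? s sep = some toks) : toks ≠ [] := by
  unfold PySem.Str.split? PySem.Chars.split? at h
  split_ifs at h with hsep
  · simp at h
  · simp only [Option.map_some, Option.some.injEq] at h
    subst h
    simp [splitOn_ne_nil]

lemma mapM_some_ne_nil (toks : List String) (rs : List Int)
    (hne : toks ≠ []) (h : toks.mapM PySem.Int.ofStr? = some rs) : rs ≠ [] := by
  cases toks with
  | nil => exact absurd rfl hne
  | cons t ts =>
    rw [List.mapM_cons] at h
    cases hv : PySem.Int.ofStr? t with
    | none => simp [hv] at h
    | some v =>
      cases hts : ts.mapM PySem.Int.ofStr? with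
      | none => simp [hv, hts] at h
      | some rest =>
        simp only [hv, hts, Option.bind_eq_bind, Option.bind_some, pure] at h
        simp only [Option.some.injEq] at h
        simp [← h]

-- in a ≤-sorted list every element is ≤ the last one
lemma pairwise_le_getLast :
    ∀ (l : List Int), l.Pairwise (· ≤ ·) → ∀ v ∈ l, ∀ g ∈ l.getLast?, v ≤ g := by
  intro l
  induction l with
  | nil => intro _ v hv; simp at hv
  | cons x t ih =>
    intro hp v hv g hg
    rcases List.pairwise_cons.mp hp with ⟨hx, ht⟩
    cases t with
    | nil =>
      simp at hv hg
      omega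
    | cons y ys =>
      rw [List.getLast?_cons_cons] at hg
      have hgmem : g ∈ y :: ys := by
        have := List.mem_of_mem_getLast? hg
        exact this
      rcases List.mem_cons.mp hv with rfl | hv'
      · exact le_trans (le_refl v) (hx g hgmem)
      · exact ih ht v hv' g hg

-- min/max-endpoints formulation = sorted-endpoints formulation, for nonempty lists
lemma minmax_eq_sortedCheck (n : Int) (rs : List Int) (hne : rs ≠ []) :
    (match PySem.List.min? rs (fun v => v), PySem.List.max? rs (fun v => v) with
      | some mn, some mx => decide (0 ≤ mn) && decide (mx < n)
      | _, _ => false)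
    = ((PySem.List.pyGet? (PySem.List.sorted rs (fun v => v) false) 0 |>.bind (fun first =>
         PySem.List.pyGet? (PySem.List.sorted rs (fun v => v) false) (-1) |>.map (fun last =>
           decide (0 ≤ first) && decide (last < n))))).getD false := by
  cases hmn : PySem.List.min? rs (fun v => v) with
  | none => exact absurd ((PySem.List.min?_eq_none_iff rs _).mp hmn) hne
  | some mn =>
  cases hmx : PySem.List.max? rs (fun v => v) with
  | none => exact absurd ((PySem.List.max?_eq_none_iff rs _).mp hmx) hne
  | some mx =>
  cases hord : PySem.List.sorted rs (fun v => v) false with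
  | nil => exact absurd ((PySem.List.sorted_eq_nil_iff rs (fun v => v) false).mp hord) hne
  | cons m t =>
    have hpw : (m :: t).Pairwise (fun a b : Int => a ≤ b) := by
      have := PySem.List.sorted_pairwise (xs := rs) (key := fun v => v)
      rwa [hord] at this
    have hmem_sorted : ∀ y, y ∈ m :: t ↔ y ∈ rs := by
      intro y
      have := PySem.List.mem_sorted (x := y) (xs := rs) (key := fun v => v) (rev := false)
      rwa [hord] at this
    -- the head of the sorted list has the min's value
    have hhead : ∀ y ∈ rs, m ≤ y := by
      intro y hy
      exact PySem.List.key_head_sorted_le rs (fun v => v) hord y hy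
    have hm_eq : m = mn := by
      have h1 : m ≤ mn := hhead mn (PySem.List.min?_mem hmn)
      have h2 : mn ≤ m := PySem.List.min?_isMin hmn m ((hmem_sorted m).mp (by simp))
      omega
    -- the last of the sorted list has the max's value
    have hglast : (m :: t).getLast? = some ((m :: t).getLast (by simp)) :=
      List.getLast?_eq_some_getLast (by simp)
    set g := (m :: t).getLast (by simp) with hgdef
    have hg_eq : g = mx := by
      have hgmem : g ∈ rs := (hmem_sorted g).mp (List.getLast_mem _)
      have h1 : g ≤ mx := PySem.List.max?_isMax hmx g hgmem
      have h2 : mx ≤ g :=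
        pairwise_le_getLast (m :: t) hpw mx ((hmem_sorted mx).mpr (PySem.List.max?_mem hmx)) g hglast
      omega
    rw [PySem.List.pyGet?_zero, PySem.List.pyGet?_neg_one, hglast]
    simp [hm_eq, hg_eq]

-- ===== VERDICT (by name: the statement is the Claim_ definition above) =====
theorem is_valid_response_py_spec : Claim_equal_is_valid_response_py := by
  intro response num_specs _dom
  unfold Spec_is_valid_response_py is_valid_response_py is_valid_response_py_alt
  by_cases he : response == ""
  · simp [he]
  · simp only [he, Bool.false_eq_true, if_false]
    cases hs : PySem.Str.split? response " " with
    | none => rfl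
    | some toks =>
      have htoks : toks ≠ [] := split?_some_ne_nil _ _ _ hs
      simp only [Option.bind_some]
      cases hm : toks.mapM PySem.Int.ofStr? with
      | none => simp only [Option.bind_none, Option.getD_none]
      | some rs =>
        simp only [Option.bind_some]
        exact minmax_eq_sortedCheck num_specs rs (mapM_some_ne_nil toks rs htoks hm)
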